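-- pv_equiv track=rewrite | github.com/zahias/advising | v2/backend/app/services/progress_processing.py | cell_color
-- ===== SOURCE A (Python) =====
-- CELL_COLORS: dict[str, str] = {
--     "c":  "#28a745",   # green  — completed
--     "cr": "#FFFACD",   # yellow — currently registered
--     "nc": "#f8d7da",   # red    — not completed
-- }
--
-- def cell_color(value: str) -> str:
--     """Return a CSS background-color value for the given processed cell value."""
--     if not isinstance(value, str):
--         return ""
--
--     collapsed = value.strip().lower()
--     color = CELL_COLORS.get(collapsed)
--     if color:
--         return f"background-color: {color}"
--
--     entries = [e.strip() for e in value.split(",") if e.strip()]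
--     for entry in entries:
--         if entry.upper().startswith("CR"):
--             return f"background-color: {CELL_COLORS['cr']}"
--
--     for entry in entries:
--         parts = entry.split("|")
--         if len(parts) == 2:
--             right = parts[1].strip().upper()
--             try:
--                 if int(right) > 0:
--                     return f"background-color: {CELL_COLORS['c']}"
--             except ValueError:
--                 if right == "PASS":
--                     return f"background-color: {CELL_COLORS['c']}"
--
--     return f"background-color: {CELL_COLORS['nc']}"
-- ===== SOURCE B (Python) =====
-- CELL_COLORS: dict[str, str] = {
--     "c":  "#28a745",   # green  — completed
--     "cr": "#FFFACD",   # yellow — currently registered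
--     "nc": "#f8d7da",   # red    — not completed
-- }
--
--
-- def _entry_completed(entry: str) -> bool:
--     parts = entry.split("|")
--     if len(parts) == 2:
--         right = parts[1].strip().upper()
--         try:
--             if int(right) > 0:
--                 return True
--         except ValueError:
--             if right == "PASS":
--                 return True
--     return False
--
--
-- def cell_color(value: str) -> str:
--     """Return a CSS background-color value for the given processed cell value."""
--     if not isinstance(value, str):
--         return ""
--
--     collapsed = value.strip().lower()
--     color = CELL_COLORS.get(collapsed)
--     if color:
--         return f"background-color: {color}"
--
--     # One pass over the raw comma pieces: strip/skip inline, maintain two flags.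
--     found_cr = False
--     found_completed = False
--     for piece in value.split(","):
--         entry = piece.strip()
--         if not entry:
--             continue
--         if entry.upper().startswith("CR"):
--             found_cr = True
--         if _entry_completed(entry):
--             found_completed = True
--
--     key = "cr" if found_cr else ("c" if found_completed else "nc")
--     return f"background-color: {CELL_COLORS[key]}"
-- ===== Notes on version B (the rewrite author's own statement) =====
-- stated objective: alternative
-- what changed: Replaces A's prebuilt filtered entries list and two sequential early-return scans with a single fold over the raw comma pieces that strips/skips inline and maintains two flags (found_cr, found_completed), picking the color after the loop so CR still wins.
import Mathlib
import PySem

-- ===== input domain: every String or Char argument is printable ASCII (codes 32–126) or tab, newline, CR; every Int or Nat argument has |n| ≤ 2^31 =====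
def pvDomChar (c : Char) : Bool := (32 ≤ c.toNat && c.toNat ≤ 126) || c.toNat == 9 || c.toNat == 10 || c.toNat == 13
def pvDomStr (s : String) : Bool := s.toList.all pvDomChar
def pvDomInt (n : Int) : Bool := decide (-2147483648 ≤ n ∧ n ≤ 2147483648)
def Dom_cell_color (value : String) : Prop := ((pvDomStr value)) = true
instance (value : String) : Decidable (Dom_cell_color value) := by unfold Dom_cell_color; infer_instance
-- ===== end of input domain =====

-- B fuses A's prebuilt filtered entries list and its two sequential scans into one
-- fold with two flags; same return value, same cost (objective: alternative).

-- ===== PORT A =====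
def pvColors : PySem.Dict (List Char) String :=
  PySem.Dict.ofList [(['c'], "#28a745"), (['c','r'], "#FFFACD"), (['n','c'], "#f8d7da")]

-- first loop of A: early return on an entry whose uppercase form starts with "CR"
def pvScanCR : List (List Char) → Bool
  | [] => false
  | e :: rest =>
    if PySem.Chars.startswith (PySem.Chars.upper e) ['C','R'] then true else pvScanCR rest

-- completion test for one stripped entry (the same helper in both Pythons; shared by both ports)
def pvEntryCompleted (entry : List Char) : Bool :=
  match PySem.Chars.splitOn entry ['|'] with
  | [_, p1] =>
    let right := PySem.Chars.upper (PySem.Chars.strip p1)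
    match PySem.Int.ofChars? right with
    | some n => decide (0 < n)
    | none => right == ['P','A','S','S']
  | _ => false

-- second loop of A
def pvScanC : List (List Char) → Bool
  | [] => false
  | e :: rest => if pvEntryCompleted e then true else pvScanC rest

def cell_color (value : String) : String :=
  let collapsed := PySem.Chars.lower (PySem.Chars.strip value.toList)
  let color := pvColors.getD collapsed ""   -- values are all non-empty, so `if color:` ↔ key found
  if color ≠ "" then "background-color: " ++ color
  else
    let entries := ((PySem.Chars.splitOn value.toList [',']).filter
        (fun e => PySem.Chars.strip e ≠ [])).map PySem.Chars.strip
    if pvScanCR entries then "background-color: " ++ pvColors.getD ['c','r'] ""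
    else if pvScanC entries then "background-color: " ++ pvColors.getD ['c'] ""
    else "background-color: " ++ pvColors.getD ['n','c'] ""

-- ===== PORT B =====
-- one step of B's single loop over the raw comma pieces
def pvStep (st : Bool × Bool) (piece : List Char) : Bool × Bool :=
  let entry := PySem.Chars.strip piece
  if entry = [] then st
  else
    ((if PySem.Chars.startswith (PySem.Chars.upper entry) ['C','R'] then true else st.1),
     (if pvEntryCompleted entry then true else st.2))

def cell_color_alt (value : String) : String :=
  let collapsed := PySem.Chars.lower (PySem.Chars.strip value.toList)
  let color := pvColors.getD collapsed ""
  if color ≠ "" then "background-color: " ++ color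
  else
    let st := (PySem.Chars.splitOn value.toList [',']).foldl pvStep (false, false)
    let key := if st.1 then ['c','r'] else if st.2 then ['c'] else ['n','c']
    "background-color: " ++ pvColors.getD key ""

-- ===== PRECONDITION & SPEC =====
def Spec_cell_color (value : String) (out : String) : Prop := out = cell_color_alt value
instance (value : String) (out : String) : Decidable (Spec_cell_color value out) := by unfold Spec_cell_color; infer_instance

-- ===== CLAIM (what is proved, stated in full; the proofs are below) =====
def Claim_equal_cell_color : Prop := ∀ (value : String), Dom_cell_color value → Spec_cell_color value (cell_color value)

-- ===== LEMMAS AND PROOFS =====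

theorem pvScanCR_eq_any (l : List (List Char)) :
    pvScanCR l = l.any (fun e => PySem.Chars.startswith (PySem.Chars.upper e) ['C','R']) := by
  induction l with
  | nil => rfl
  | cons e rest ih =>
    simp only [pvScanCR, ih, List.any_cons]
    split_ifs with h <;> simp [h]

theorem pvScanC_eq_any (l : List (List Char)) :
    pvScanC l = l.any pvEntryCompleted := by
  induction l with
  | nil => rfl
  | cons e rest ih =>
    simp only [pvScanC, ih, List.any_cons]
    split_ifs with h <;> simp [h]

theorem pvStep_foldl (l : List (List Char)) (st : Bool × Bool) :
    l.foldl pvStep st =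
      (st.1 || (((l.filter (fun e => PySem.Chars.strip e ≠ [])).map PySem.Chars.strip).any
          (fun e => PySem.Chars.startswith (PySem.Chars.upper e) ['C','R'])),
       st.2 || (((l.filter (fun e => PySem.Chars.strip e ≠ [])).map PySem.Chars.strip).any
          pvEntryCompleted)) := by
  induction l generalizing st with
  | nil => simp
  | cons e rest ih =>
    obtain ⟨a, b⟩ := st
    by_cases h : PySem.Chars.strip e = []
    · simp [List.foldl_cons, pvStep, h, ih]
    · rw [List.foldl_cons, ih]
      simp [pvStep, h, Bool.or_assoc, Bool.or_left_comm]

-- ===== VERDICT (by name: the statement is the Claim_ definition above) =====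
theorem cell_color_spec : Claim_equal_cell_color := by
  intro value _
  unfold Spec_cell_color cell_color cell_color_alt
  simp only [pvStep_foldl, pvScanCR_eq_any, pvScanC_eq_any, Bool.false_or]
  by_cases h0 : pvColors.getD (PySem.Chars.lower (PySem.Chars.strip value.toList)) "" = ""
  · rw [if_neg (fun hcon => hcon h0)]
    conv_rhs => rw [if_neg (fun hcon => hcon h0)]
    cases hcr : ((((PySem.Chars.splitOn value.toList [',']).filter
        (fun e => PySem.Chars.strip e ≠ [])).map PySem.Chars.strip).any
        (fun e => PySem.Chars.startswith (PySem.Chars.upper e) ['C','R'])) <;>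
      cases hc : ((((PySem.Chars.splitOn value.toList [',']).filter
          (fun e => PySem.Chars.strip e ≠ [])).map PySem.Chars.strip).any
          pvEntryCompleted) <;> rfl
  · rw [if_pos h0]
    conv_rhs => rw [if_pos h0]
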